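-- pv_equiv track=rewrite | github.com/3gerrard/nested-loop | main3.py | decimal_to_binary_manual
-- ===== SOURCE A (Python) =====
-- def decimal_to_binary_manual(decimal_num):
--     """
--     Converts a decimal number to its binary representation using successive division.
--     """
--     if not isinstance(decimal_num, int):
--         raise TypeError("Input must be an integer.")
--     if decimal_num < 0:
--         return "Cannot convert negative numbers with this method without handling two's complement."
--     if decimal_num == 0:
--         return "0"
--
--     binary_digits = []
--     temp_num = decimal_num
--     while temp_num > 0:
--         remainder = temp_num % 2
--         binary_digits.append(str(remainder))
--         temp_num //= 2  # Integer division
--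
--     # The binary digits are collected in reverse order, so reverse them
--     return "".join(binary_digits[::-1])
-- ===== SOURCE B (Python) =====
-- def decimal_to_binary_manual(decimal_num):
--     """
--     Converts a decimal number to its binary representation by scanning powers
--     of two from the most significant bit down (no digit list, no reversal,
--     no modulo on the number).
--     """
--     if not isinstance(decimal_num, int):
--         raise TypeError("Input must be an integer.")
--     if decimal_num < 0:
--         return "Cannot convert negative numbers with this method without handling two's complement."
--
--     # largest power of two not exceeding decimal_num (1 when decimal_num is 0)
--     p = 1
--     while p * 2 <= decimal_num:
--         p *= 2
--
--     chars = []
--     rem = decimal_num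
--     while p >= 1:
--         if rem >= p:
--             chars.append('1')
--             rem -= p
--         else:
--             chars.append('0')
--         p //= 2
--     return ''.join(chars)
-- ===== Notes on version B (the rewrite author's own statement) =====
-- stated objective: alternative
-- what changed: Replaced the LSB-first digit-list loop with [::-1] reversal and join by an MSB-first scan: first find the highest power of two not exceeding the input, then emit one digit per power by comparison and subtraction, so no digit reversal and no modulo on the number, and the zero guard becomes unnecessary because the scan already yields the right single digit there.
import Mathlib
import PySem

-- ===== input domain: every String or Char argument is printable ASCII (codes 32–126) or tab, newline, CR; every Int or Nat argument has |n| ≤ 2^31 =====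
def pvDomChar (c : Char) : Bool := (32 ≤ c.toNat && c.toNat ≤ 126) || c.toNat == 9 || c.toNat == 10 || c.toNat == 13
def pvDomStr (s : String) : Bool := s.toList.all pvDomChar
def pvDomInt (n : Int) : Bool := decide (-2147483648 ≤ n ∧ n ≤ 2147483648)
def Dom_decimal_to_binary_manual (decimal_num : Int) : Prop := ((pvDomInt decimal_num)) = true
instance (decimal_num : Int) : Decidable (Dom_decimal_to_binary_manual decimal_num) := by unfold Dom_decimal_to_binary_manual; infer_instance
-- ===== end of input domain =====

-- B replaces A's LSB-first digit-list loop + [::-1] reversal by an MSB-first scan over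
-- descending powers of two (comparison and subtraction instead of modulo, no reversal);
-- objective: alternative.

-- ===== PORT A =====
-- the while loop: digits accumulated LSB-first in a list
def pvALoop (temp_num : Int) (binary_digits : List String) : List String :=
  if 0 < temp_num then
    pvALoop (PySem.Int.floordiv temp_num 2)
      (binary_digits ++ [PySem.Int.toStr (PySem.Int.mod temp_num 2)])
  else binary_digits
termination_by temp_num.toNat
decreasing_by
  rw [PySem.Int.floordiv_eq_ediv_of_pos (by omega : (0:Int) < 2)]
  omega

def decimal_to_binary_manual (decimal_num : Int) : String :=
  if decimal_num < 0 then
    "Cannot convert negative numbers with this method without handling two's complement."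
  else if decimal_num = 0 then "0"
  else
    -- "".join(binary_digits[::-1]); xs[::-1] is List.reverse
    PySem.Str.join "" (pvALoop decimal_num []).reverse

-- ===== PORT B =====
-- while p * 2 <= n: p *= 2   (the '0 < p' conjunct only makes the recursion total;
-- the Python loop is only ever entered with p = 1)
def pvHighPow (n : Int) (p : Int) : Int :=
  if _h : 0 < p ∧ p * 2 ≤ n then pvHighPow n (p * 2) else p
termination_by (n - p).toNat
decreasing_by omega

-- while p >= 1: emit '1'/'0' by comparison with p, subtracting when the bit is set
def pvScan (rem : Int) (p : Int) : List String :=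
  if _h : 1 ≤ p then
    if rem ≥ p then "1" :: pvScan (rem - p) (PySem.Int.floordiv p 2)
    else "0" :: pvScan rem (PySem.Int.floordiv p 2)
  else []
termination_by p.toNat
decreasing_by
  all_goals rw [PySem.Int.floordiv_eq_ediv_of_pos (by omega : (0:Int) < 2)]; omega

def decimal_to_binary_manual_alt (decimal_num : Int) : String :=
  if decimal_num < 0 then
    "Cannot convert negative numbers with this method without handling two's complement."
  else
    PySem.Str.join "" (pvScan decimal_num (pvHighPow decimal_num 1))

-- ===== PRECONDITION & SPEC =====
def Spec_decimal_to_binary_manual (decimal_num : Int) (out : String) : Prop := out = decimal_to_binary_manual_alt decimal_num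
instance (decimal_num : Int) (out : String) : Decidable (Spec_decimal_to_binary_manual decimal_num out) := by unfold Spec_decimal_to_binary_manual; infer_instance

-- ===== CLAIM (what is proved, stated in full; the proofs are below) =====
def Claim_equal_decimal_to_binary_manual : Prop := ∀ (decimal_num : Int), Dom_decimal_to_binary_manual decimal_num → Spec_decimal_to_binary_manual decimal_num (decimal_to_binary_manual decimal_num)

-- ===== LEMMAS AND PROOFS =====

-- fixed-width binary digit list of r (LSB-recursive reference), width j
def pvBitsPad (j : Nat) (r : Int) : List String :=
  match j with
  | 0 => []
  | j + 1 => pvBitsPad j (PySem.Int.floordiv r 2) ++ [PySem.Int.toStr (PySem.Int.mod r 2)]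

-- pvHighPow returns the highest power of two ≤ n (for n ≥ 1, started at p = 2^j ≤ n)
lemma pv_highPow (n : Int) : ∀ (m : Nat) (j : Nat) (p : Int), (n - p).toNat = m →
    p = 2 ^ j → p ≤ n → ∃ k : Nat, pvHighPow n p = 2 ^ k ∧ 2 ^ k ≤ n ∧ n < 2 ^ (k + 1) := by
  intro m
  induction m using Nat.strong_induction_on with
  | _ m ih =>
    intro j p hm hp hpn
    have hppos : 0 < p := by
      have : (0:Int) < 2 ^ j := by positivity
      omega
    rw [pvHighPow]
    by_cases h : 0 < p ∧ p * 2 ≤ n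
    · rw [dif_pos h]
      exact ih ((n - p * 2).toNat) (by omega) (j + 1) (p * 2)
        rfl (by rw [hp, pow_succ]) h.2
    · rw [dif_neg h]
      have h2 : ¬ (p * 2 ≤ n) := fun hx => h ⟨hppos, hx⟩
      refine ⟨j, hp, hp ▸ hpn, ?_⟩
      rw [pow_succ, ← hp]
      omega

-- top-digit split of the fixed-width representation
lemma pv_bitsPad_split : ∀ (j : Nat) (r : Int), 0 ≤ r → r < 2 ^ (j + 1) →
    pvBitsPad (j + 1) r =
      (if (2:Int) ^ j ≤ r then "1" else "0") ::
        pvBitsPad j (if (2:Int) ^ j ≤ r then r - 2 ^ j else r) := by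
  intro j
  induction j with
  | zero =>
    intro r h0 h2
    interval_cases r <;> simp [pvBitsPad] <;> decide
  | succ j ih =>
    intro r h0 h2
    have hP : (0:Int) < 2 ^ j := by positivity
    have hS : (2:Int) ^ (j + 1) = 2 ^ j * 2 := pow_succ 2 j
    have hSS : (2:Int) ^ (j + 2) = 2 ^ j * 2 * 2 := by
      rw [pow_succ, pow_succ]
    show pvBitsPad (j + 2) r = _
    rw [show pvBitsPad (j + 2) r
        = pvBitsPad (j + 1) (PySem.Int.floordiv r 2) ++ [PySem.Int.toStr (PySem.Int.mod r 2)] from rfl]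
    rw [PySem.Int.floordiv_eq_ediv_of_pos (by omega : (0:Int) < 2)]
    rw [ih (r / 2) (by omega) (by omega)]
    by_cases hc : (2:Int) ^ (j + 1) ≤ r
    · rw [if_pos (show (2:Int) ^ j ≤ r / 2 by omega), if_pos hc, if_pos hc,
          if_pos (show (2:Int) ^ j ≤ r / 2 by omega), List.cons_append]
      congr 1
      rw [show pvBitsPad (j + 1) (r - 2 ^ (j + 1))
          = pvBitsPad j (PySem.Int.floordiv (r - 2 ^ (j + 1)) 2)
            ++ [PySem.Int.toStr (PySem.Int.mod (r - 2 ^ (j + 1)) 2)] from rfl]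
      rw [PySem.Int.floordiv_eq_ediv_of_pos (by omega : (0:Int) < 2),
          PySem.Int.mod_eq_emod_of_pos (by omega : (0:Int) < 2),
          PySem.Int.mod_eq_emod_of_pos (by omega : (0:Int) < 2)]
      have h1 : r / 2 - 2 ^ j = (r - 2 ^ (j + 1)) / 2 := by omega
      have h2' : r % 2 = (r - 2 ^ (j + 1)) % 2 := by omega
      rw [h1, h2']
    · rw [if_neg (show ¬ (2:Int) ^ j ≤ r / 2 by omega), if_neg hc, if_neg hc,
          if_neg (show ¬ (2:Int) ^ j ≤ r / 2 by omega), List.cons_append]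
      congr 1
      rw [show pvBitsPad (j + 1) r
          = pvBitsPad j (PySem.Int.floordiv r 2) ++ [PySem.Int.toStr (PySem.Int.mod r 2)] from rfl]
      rw [PySem.Int.floordiv_eq_ediv_of_pos (by omega : (0:Int) < 2)]

-- the MSB-first scan computes the fixed-width representation
lemma pv_scan : ∀ (j : Nat) (r : Int), 0 ≤ r → r < 2 ^ (j + 1) →
    pvScan r (2 ^ j) = pvBitsPad (j + 1) r := by
  intro j
  induction j with
  | zero =>
    intro r h0 h2
    interval_cases r <;> (rw [pvScan]; norm_num) <;>
      (rw [pvScan]; simp [pvBitsPad]; decide)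
  | succ j ih =>
    intro r h0 h2
    have hP : (0:Int) < 2 ^ j := by positivity
    have hS : (2:Int) ^ (j + 1) = 2 ^ j * 2 := pow_succ 2 j
    have hSS : (2:Int) ^ (j + 2) = 2 ^ j * 2 * 2 := by rw [pow_succ, pow_succ]
    rw [pvScan, dif_pos (by omega : (1:Int) ≤ 2 ^ (j + 1))]
    have hdiv : PySem.Int.floordiv ((2:Int) ^ (j + 1)) 2 = 2 ^ j := by
      rw [PySem.Int.floordiv_eq_ediv_of_pos (by omega : (0:Int) < 2)]
      omega
    rw [pv_bitsPad_split (j + 1) r h0 h2]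
    by_cases hc : r ≥ (2:Int) ^ (j + 1)
    · rw [if_pos hc, if_pos hc, if_pos hc, hdiv,
          ih (r - 2 ^ (j + 1)) (by omega) (by omega)]
    · rw [if_neg hc, if_neg (by omega : ¬ (2:Int) ^ (j + 1) ≤ r),
          if_neg (by omega : ¬ (2:Int) ^ (j + 1) ≤ r), hdiv, ih r h0 (by omega)]

-- A's loop, reversed, is the exact-width representation (no leading zeros)
lemma pv_aloop : ∀ (j : Nat) (x : Int) (acc : List String), 2 ^ j ≤ x → x < 2 ^ (j + 1) →
    (pvALoop x acc).reverse = pvBitsPad (j + 1) x ++ acc.reverse := by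
  intro j
  induction j with
  | zero =>
    intro x acc h1 h2
    have hx : x = 1 := by omega
    subst hx
    rw [pvALoop, if_pos (by omega : (0:Int) < 1)]
    rw [pvALoop]
    rw [if_neg (by rw [PySem.Int.floordiv_eq_ediv_of_pos (by omega : (0:Int) < 2)]; omega)]
    simp [pvBitsPad]
  | succ j ih =>
    intro x acc h1 h2
    have hP : (0:Int) < 2 ^ j := by positivity
    have hS : (2:Int) ^ (j + 1) = 2 ^ j * 2 := pow_succ 2 j
    have hSS : (2:Int) ^ (j + 2) = 2 ^ j * 2 * 2 := by rw [pow_succ, pow_succ]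
    rw [pvALoop, if_pos (by omega : (0:Int) < x)]
    have hdb : (2:Int) ^ j ≤ PySem.Int.floordiv x 2 ∧ PySem.Int.floordiv x 2 < 2 ^ (j + 1) := by
      rw [PySem.Int.floordiv_eq_ediv_of_pos (by omega : (0:Int) < 2)]
      omega
    rw [ih _ _ hdb.1 hdb.2]
    rw [show pvBitsPad (j + 2) x
        = pvBitsPad (j + 1) (PySem.Int.floordiv x 2) ++ [PySem.Int.toStr (PySem.Int.mod x 2)] from rfl]
    simp

-- ===== VERDICT (by name: the statement is the Claim_ definition above) =====
theorem decimal_to_binary_manual_spec : Claim_equal_decimal_to_binary_manual := by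
  intro n _
  unfold Spec_decimal_to_binary_manual decimal_to_binary_manual decimal_to_binary_manual_alt
  by_cases hneg : n < 0
  · rw [if_pos hneg, if_pos hneg]
  · rw [if_neg hneg, if_neg hneg]
    by_cases h0 : n = 0
    · subst h0
      rw [if_pos rfl]
      rw [show pvHighPow 0 1 = 1 by rw [pvHighPow]; norm_num]
      rw [show pvScan 0 1 = ["0"] by
        rw [pvScan, dif_pos (by omega : (1:Int) ≤ 1),
            if_neg (by omega : ¬ (0:Int) ≥ 1)]
        rw [show PySem.Int.floordiv 1 2 = 0 by decide]
        rw [pvScan, dif_neg (by omega : ¬ (1:Int) ≤ 0)]]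
      apply String.toList_injective
      simp [PySem.Str.join, PySem.Chars.join, List.intercalate]
    · rw [if_neg h0]
      obtain ⟨k, hk, hk1, hk2⟩ :=
        pv_highPow n (n - 1).toNat 0 1 (by omega) (by norm_num) (by omega)
      rw [hk, pv_scan k n (by omega) hk2, pv_aloop k n [] hk1 hk2]
      simp
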